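-- pv_equiv track=rewrite | github.com/FluentFlier/feral | prepare_labels.py | _detect_status_col
-- ===== SOURCE A (Python) =====
-- def _detect_status_col(hdr, recs):
--     if not hdr or not recs: return None
--     cand=[c for c in hdr if any(k in c.lower() for k in ["status","comment","event","state"])]
--     def has(col):
--         for r in recs:
--             v=str(r.get(col,"")).lower()
--             if "start" in v or "stop" in v: return True
--         return False
--     for c in cand:
--         if has(c): return c
--     for c in hdr:
--         if has(c): return c
--     return None
-- ===== SOURCE B (Python) =====
-- def _detect_status_col(hdr, recs):
--     if not hdr or not recs: return None
--     # records-outer / columns-inner pass: the set of columns whose values mention start/stop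
--     q = set()
--     for r in recs:
--         for c in hdr:
--             v = str(r.get(c, "")).lower()
--             if "start" in v or "stop" in v:
--                 q.add(c)
--     # single pass over hdr with a fallback accumulator: return the first qualifying
--     # keyword column; failing that, the first qualifying column at all
--     fb = None
--     for c in hdr:
--         if c in q:
--             w = c.lower()
--             if "status" in w or "comment" in w or "event" in w or "state" in w:
--                 return c
--             if fb is None:
--                 fb = c
--     return fb
-- ===== Notes on version B (the rewrite author's own statement) =====
-- stated objective: alternative
-- what changed: B first builds the set Q of qualifying columns in one records-outer/columns-inner pass (inverting A's per-column scans with early exit), then replaces A's two staged passes (candidates, then all of hdr) by a single pass over hdr with a fallback accumulator.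
import Mathlib
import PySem

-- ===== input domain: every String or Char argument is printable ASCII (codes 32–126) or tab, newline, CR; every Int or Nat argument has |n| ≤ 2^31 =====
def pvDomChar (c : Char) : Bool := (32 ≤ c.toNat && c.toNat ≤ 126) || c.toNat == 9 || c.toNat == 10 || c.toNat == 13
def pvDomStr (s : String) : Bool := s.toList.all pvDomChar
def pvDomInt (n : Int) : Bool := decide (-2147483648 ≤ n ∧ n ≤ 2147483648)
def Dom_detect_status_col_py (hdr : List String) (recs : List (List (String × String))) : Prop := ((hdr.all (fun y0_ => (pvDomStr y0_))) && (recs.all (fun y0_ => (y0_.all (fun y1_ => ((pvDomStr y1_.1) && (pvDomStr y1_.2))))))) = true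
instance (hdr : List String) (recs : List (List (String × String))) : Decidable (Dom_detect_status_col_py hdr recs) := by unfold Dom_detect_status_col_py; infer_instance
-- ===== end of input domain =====

-- B builds the qualifying-column set in one records-outer pass and then replaces A's two
-- staged passes by a single pass over hdr with a fallback accumulator; alternative
-- decomposition, same cost.

-- ===== PORT A =====
-- has(col): scan recs, early return on first record whose value mentions start/stop
def aHas (recs : List (List (String × String))) (col : String) : Bool :=
  recs.any (fun r =>
    let v := PySem.Str.lower ((PySem.Dict.mk r).getD col "")
    PySem.Str.isIn "start" v || PySem.Str.isIn "stop" v)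

def detect_status_col_py (hdr : List String) (recs : List (List (String × String))) : Option String :=
  if hdr.isEmpty || recs.isEmpty then none
  else
    let cand := hdr.filter (fun c =>
      (["status", "comment", "event", "state"]).any (fun k => PySem.Str.isIn k (PySem.Str.lower c)))
    match cand.find? (aHas recs) with
    | some c => some c
    | none => hdr.find? (aHas recs)

-- ===== PORT B =====
-- does record r qualify column c ("start"/"stop" in its value)?
def bQual (r : List (String × String)) (c : String) : Bool :=
  let v := PySem.Str.lower ((PySem.Dict.mk r).getD c "")
  PySem.Str.isIn "start" v || PySem.Str.isIn "stop" v

-- records-outer / columns-inner pass building the qualifying set Q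
def bQ (hdr : List String) (recs : List (List (String × String))) : PySem.Set String :=
  recs.foldl (fun q r => hdr.foldl (fun q c => if bQual r c then PySem.Set.add q c else q) q)
    PySem.Set.empty

-- keyword test on the column name
def bKey (c : String) : Bool :=
  let w := PySem.Str.lower c
  PySem.Str.isIn "status" w || PySem.Str.isIn "comment" w ||
    PySem.Str.isIn "event" w || PySem.Str.isIn "state" w

-- single pass with the fallback accumulator fb
def bPick (q : PySem.Set String) : List String → Option String → Option String
  | [], fb => fb
  | c :: rest, fb =>
    if PySem.Set.contains q c then
      if bKey c then some c
      else bPick q rest (if fb.isNone then some c else fb)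
    else bPick q rest fb

def detect_status_col_py_alt (hdr : List String) (recs : List (List (String × String))) : Option String :=
  if hdr.isEmpty || recs.isEmpty then none
  else bPick (bQ hdr recs) hdr none

-- ===== PRECONDITION & SPEC =====
def Spec_detect_status_col_py (hdr : List String) (recs : List (List (String × String))) (out : Option String) : Prop := out = detect_status_col_py_alt hdr recs
instance (hdr : List String) (recs : List (List (String × String))) (out : Option String) : Decidable (Spec_detect_status_col_py hdr recs out) := by unfold Spec_detect_status_col_py; infer_instance

-- ===== CLAIM (what is proved, stated in full; the proofs are below) =====
def Claim_equal_detect_status_col_py : Prop := ∀ (hdr : List String) (recs : List (List (String × String))), Dom_detect_status_col_py hdr recs → Spec_detect_status_col_py hdr recs (detect_status_col_py hdr recs)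

-- ===== LEMMAS AND PROOFS =====

-- membership in the inner columns fold
theorem mem_inner_fold (r : List (String × String)) (hdr : List String)
    (q : PySem.Set String) (x : String) :
    (x ∈ hdr.foldl (fun q c => if bQual r c then PySem.Set.add q c else q) q)
      ↔ x ∈ q ∨ (x ∈ hdr ∧ bQual r x = true) := by
  induction hdr generalizing q with
  | nil => simp
  | cons c rest ih =>
    simp only [List.foldl_cons, List.mem_cons]
    by_cases h : bQual r c = true
    · rw [if_pos h, ih, PySem.Set.mem_add]
      constructor
      · rintro (⟨h1 | h1⟩ | h1)
        · exact Or.inl h1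
        · exact Or.inr ⟨Or.inl h1, h1 ▸ h⟩
        · exact Or.inr ⟨Or.inr h1.1, h1.2⟩
      · rintro (h1 | ⟨(h1 | h1), h2⟩)
        · exact Or.inl (Or.inl h1)
        · exact Or.inl (Or.inr h1)
        · exact Or.inr ⟨h1, h2⟩
    · rw [if_neg h, ih]
      constructor
      · rintro (h1 | h1)
        · exact Or.inl h1
        · exact Or.inr ⟨Or.inr h1.1, h1.2⟩
      · rintro (h1 | ⟨(h1 | h1), h2⟩)
        · exact Or.inl h1
        · exact absurd (h1 ▸ h2) h
        · exact Or.inr ⟨h1, h2⟩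

-- membership in Q characterised by A's has()
theorem mem_bQ (hdr : List String) (recs : List (List (String × String))) (x : String) :
    x ∈ bQ hdr recs ↔ x ∈ hdr ∧ aHas recs x = true := by
  unfold bQ aHas
  have key : ∀ (rs : List (List (String × String))) (q : PySem.Set String),
      (x ∈ rs.foldl (fun q r => hdr.foldl
          (fun q c => if bQual r c then PySem.Set.add q c else q) q) q)
        ↔ x ∈ q ∨ (x ∈ hdr ∧ ∃ r ∈ rs, bQual r x = true) := by
    intro rs
    induction rs with
    | nil => simp
    | cons r rest ih =>
      intro q
      simp only [List.foldl_cons, ih, mem_inner_fold, List.mem_cons]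
      constructor
      · rintro ((h1 | ⟨h1, h2⟩) | ⟨h1, r', hr', h2⟩)
        · exact Or.inl h1
        · exact Or.inr ⟨h1, r, Or.inl rfl, h2⟩
        · exact Or.inr ⟨h1, r', Or.inr hr', h2⟩
      · rintro (h1 | ⟨h1, r', (rfl | hr'), h2⟩)
        · exact Or.inl (Or.inl h1)
        · exact Or.inl (Or.inr ⟨h1, h2⟩)
        · exact Or.inr ⟨h1, r', hr', h2⟩
  rw [key]
  simp [List.any_eq_true, PySem.Set.empty, bQual]

theorem contains_bQ_of_mem {hdr : List String} {recs : List (List (String × String))}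
    {x : String} (hx : x ∈ hdr) :
    PySem.Set.contains (bQ hdr recs) x = aHas recs x := by
  by_cases h : aHas recs x = true
  · rw [h]
    exact (PySem.Set.contains_iff _ _).mpr ((mem_bQ hdr recs x).mpr ⟨hx, h⟩)
  · rw [eq_false_of_ne_true h, ← Bool.not_eq_true, PySem.Set.contains_iff, mem_bQ]
    exact fun hc => h hc.2

-- B's keyword test is A's candidate predicate
theorem bKey_eq_cand (c : String) :
    bKey c = (["status", "comment", "event", "state"]).any
      (fun k => PySem.Str.isIn k (PySem.Str.lower c)) := by
  simp [bKey, List.any, Bool.or_assoc]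

-- the single pass with fallback computes A's two staged finds
theorem bPick_eq (recs : List (List (String × String))) (q : PySem.Set String) :
    ∀ (cs : List String) (fb : Option String),
      (∀ c ∈ cs, PySem.Set.contains q c = aHas recs c) →
      bPick q cs fb
        = match (cs.filter bKey).find? (aHas recs) with
          | some c => some c
          | none =>
            match fb with
            | some x => some x
            | none => cs.find? (aHas recs) := by
  intro cs
  induction cs with
  | nil => intro fb _; cases fb <;> rfl
  | cons c rest ih =>
    intro fb hq
    have hc : PySem.Set.contains q c = aHas recs c := hq c (List.mem_cons_self ..)
    have hrest : ∀ x ∈ rest, PySem.Set.contains q x = aHas recs x :=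
      fun x hx => hq x (List.mem_cons_of_mem _ hx)
    by_cases hh : aHas recs c = true
    · have hct : PySem.Set.contains q c = true := hc.trans hh
      by_cases hk : bKey c = true
      · rw [List.filter_cons_of_pos hk, List.find?_cons_of_pos hh]
        simp only [bPick]
        rw [hct, if_pos rfl, if_pos hk]
      · have hkf : bKey c = false := eq_false_of_ne_true hk
        simp only [bPick]
        rw [hct, if_pos rfl, if_neg (by rw [hkf]; simp), ih _ hrest,
          List.filter_cons_of_neg (by rw [hkf]; simp)]
        cases hfind : (rest.filter bKey).find? (aHas recs) with
        | some d => rfl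
        | none =>
          cases fb with
          | none => simp; exact (List.find?_cons_of_pos hh).symm
          | some x => rfl
    · have hhf : aHas recs c = false := eq_false_of_ne_true hh
      have hcf : PySem.Set.contains q c = false := hc.trans hhf
      simp only [bPick]
      rw [hcf, if_neg (by simp), ih _ hrest, List.find?_cons_of_neg hh]
      by_cases hk : bKey c = true
      · rw [List.filter_cons_of_pos hk, List.find?_cons_of_neg hh]
      · rw [List.filter_cons_of_neg (by simpa using hk)]

theorem filter_congr_pred (l : List String) :
    l.filter bKey = l.filter (fun c =>
      (["status", "comment", "event", "state"]).any (fun k => PySem.Str.isIn k (PySem.Str.lower c))) := by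
  apply List.filter_congr
  intro x _
  exact bKey_eq_cand x

-- ===== VERDICT (by name: the statement is the Claim_ definition above) =====
theorem detect_status_col_py_spec : Claim_equal_detect_status_col_py := by
  intro hdr recs _
  unfold Spec_detect_status_col_py detect_status_col_py detect_status_col_py_alt
  by_cases he : (hdr.isEmpty || recs.isEmpty) = true
  · simp [he]
  · rw [if_neg he, if_neg he,
      bPick_eq recs (bQ hdr recs) hdr none (fun c hc => contains_bQ_of_mem hc),
      filter_congr_pred]
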